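-- pv_equiv track=rewrite | github.com/nwilliams770/python-divers | pseudo_palindromic_paths_in_bin_tree.py | isPseudoPalindromic
-- ===== SOURCE A (Python) =====
-- def isPseudoPalindromic(p):
--     frequency = {}
--     for i in p:
--         frequency[i] = frequency.get(i, 0) + 1
--
--     odd_occurences = 0
--     for v in frequency.values():
--         if v % 2 != 0:
--             odd_occurences += 1
--
--         if odd_occurences > 1:
--             return False
--     return True
-- ===== SOURCE B (Python) =====
-- def isPseudoPalindromic(p):
--     odd = set()
--     for i in p:
--         if i in odd:
--             odd.remove(i)
--         else:
--             odd.add(i)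
--     return len(odd) <= 1
-- ===== Notes on version B (the rewrite author's own statement) =====
-- stated objective: idiomatic
-- what changed: Replaces the frequency dict plus a second values()-counting loop (with early exit) by a single pass that toggles each element in a parity set, returning len(odd) <= 1 at the end.
import Mathlib
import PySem

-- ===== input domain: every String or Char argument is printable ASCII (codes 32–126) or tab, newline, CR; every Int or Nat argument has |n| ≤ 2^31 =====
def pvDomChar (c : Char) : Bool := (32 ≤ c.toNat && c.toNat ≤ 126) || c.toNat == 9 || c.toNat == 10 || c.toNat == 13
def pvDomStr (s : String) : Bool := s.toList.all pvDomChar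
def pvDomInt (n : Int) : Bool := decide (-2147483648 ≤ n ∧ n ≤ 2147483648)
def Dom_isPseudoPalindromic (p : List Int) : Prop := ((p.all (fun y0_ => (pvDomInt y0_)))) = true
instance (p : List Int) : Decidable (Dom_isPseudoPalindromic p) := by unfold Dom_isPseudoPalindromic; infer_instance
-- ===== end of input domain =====

-- B replaces A's frequency dict + second odd-counting loop by one pass toggling a parity set (idiomatic).


-- ===== PORT A =====
-- the second loop of A: walks frequency.values(), incrementing odd_occurences and
-- early-returning False as soon as it exceeds 1
def pvOddLoop : List Int → Int → Bool
  | [], _ => true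
  | v :: rest, acc =>
    let acc' := if PySem.Int.mod v 2 ≠ 0 then acc + 1 else acc
    if acc' > 1 then false else pvOddLoop rest acc'

def isPseudoPalindromic (p : List Int) : Bool :=
  let frequency := p.foldl (fun d i => d.insert i (d.getD i 0 + 1)) PySem.Dict.empty
  pvOddLoop frequency.values 0

-- ===== PORT B =====
def isPseudoPalindromic_alt (p : List Int) : Bool :=
  decide (PySem.Set.len
    (p.foldl (fun s i => if PySem.Set.contains s i then PySem.Set.discard s i else PySem.Set.add s i)
      PySem.Set.empty) ≤ 1)

-- ===== PRECONDITION & SPEC =====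
def Spec_isPseudoPalindromic (p : List Int) (out : Bool) : Prop := out = isPseudoPalindromic_alt p
instance (p : List Int) (out : Bool) : Decidable (Spec_isPseudoPalindromic p out) := by unfold Spec_isPseudoPalindromic; infer_instance

-- ===== CLAIM (what is proved, stated in full; the proofs are below) =====
def Claim_equal_isPseudoPalindromic : Prop := ∀ (p : List Int), Dom_isPseudoPalindromic p → Spec_isPseudoPalindromic p (isPseudoPalindromic p)

-- ===== LEMMAS AND PROOFS =====

-- the list of distinct elements of p with an odd count, in first-occurrence order (proof-only helper)
def pvOddKeys (p : List Int) : List Int :=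
  (PySem.Set.ofList p).filter (fun k => p.count k % 2 == 1)

-- A's value loop computes "acc + (number of odd values) ≤ 1" when entered with acc ≤ 1
theorem pvOddLoop_eq (vs : List Int) : ∀ acc : Int, acc ≤ 1 →
    pvOddLoop vs acc = decide (acc + (vs.countP (fun v => !(v % 2 == 0))) ≤ 1) := by
  induction vs with
  | nil => intro acc hacc; simp [pvOddLoop]; omega
  | cons v rest ih =>
    intro acc hacc
    by_cases hv : v % 2 = 1
    · by_cases h1 : acc + 1 > 1
      · have h2 : ¬ (acc + ((rest.countP (fun v => !(v % 2 == 0)) : Nat) + 1 : Int) ≤ 1) := by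
          have : (0 : Int) ≤ (rest.countP (fun v => !(v % 2 == 0)) : Nat) := by positivity
          omega
        simp [pvOddLoop, hv, h1]
        push_cast at h2
        omega
      · rw [show pvOddLoop (v :: rest) acc = pvOddLoop rest (acc + 1) from by
          simp [pvOddLoop, hv, show ¬ (1 < acc + 1) from by omega]]
        rw [ih (acc + 1) (by omega)]
        have hc : (v :: rest).countP (fun v => !(v % 2 == 0))
            = rest.countP (fun v => !(v % 2 == 0)) + 1 := by
          simp [List.countP_cons, hv]
        rw [hc]
        simp only [decide_eq_decide]
        push_cast
        omega
    · have hv0 : v % 2 = 0 := by omega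
      rw [show pvOddLoop (v :: rest) acc = pvOddLoop rest acc from by
          simp [pvOddLoop, hv, show ¬ (1 < acc) from by omega]]
      rw [ih acc hacc]
      simp [hv0]

-- B's toggle loop: membership and no-duplicates invariant
theorem toggle_invariant {l : List Int} : ∀ s : PySem.Set Int, s.Nodup →
    (l.foldl (fun s i => if PySem.Set.contains s i then PySem.Set.discard s i else PySem.Set.add s i) s).Nodup ∧
    (∀ x, x ∈ l.foldl (fun s i => if PySem.Set.contains s i then PySem.Set.discard s i else PySem.Set.add s i) s ↔
      ((x ∈ s ∧ l.count x % 2 = 0) ∨ (x ∉ s ∧ l.count x % 2 = 1))) := by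
  induction l with
  | nil =>
    intro s hs
    refine ⟨hs, fun x => ?_⟩
    simp only [List.foldl_nil, List.count_nil]
    by_cases hxs : x ∈ s <;> simp [hxs]
  | cons a rest ih =>
    intro s hs
    by_cases has : a ∈ s
    · have hstep : (if PySem.Set.contains s a then PySem.Set.discard s a else PySem.Set.add s a)
          = PySem.Set.discard s a := by
        simp [has]
      obtain ⟨hn, hm⟩ := ih (PySem.Set.discard s a) (PySem.Set.nodup_discard s a hs)
      rw [List.foldl_cons, hstep]
      refine ⟨hn, fun x => ?_⟩
      rw [hm x, PySem.Set.mem_discard, List.count_cons]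
      by_cases hxa : x = a
      · subst hxa
        have hbeq : (x == x) = true := by simp
        rw [hbeq]
        simp only [has, ne_eq, not_true_eq_false, not_false_eq_true, and_false, false_and,
          and_true, true_and, false_or, or_false, not_not, true_or, or_true, if_true, if_pos]
        omega
      · have hax : ¬ (a == x) := by simpa using fun h => hxa h.symm
        by_cases hxs : x ∈ s <;> simp [hxs, hxa, hax]
    · have hstep : (if PySem.Set.contains s a then PySem.Set.discard s a else PySem.Set.add s a)
          = PySem.Set.add s a := by
        simp [has]
      obtain ⟨hn, hm⟩ := ih (PySem.Set.add s a) (PySem.Set.nodup_add s a hs)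
      rw [List.foldl_cons, hstep]
      refine ⟨hn, fun x => ?_⟩
      rw [hm x, PySem.Set.mem_add, List.count_cons]
      by_cases hxa : x = a
      · subst hxa
        simp [has]
        omega
      · have hax : ¬ (a == x) := by simpa using fun h => hxa h.symm
        by_cases hxs : x ∈ s <;> simp [hxs, hxa, hax]

theorem toggle_perm_oddKeys (p : List Int) :
    (p.foldl (fun s i => if PySem.Set.contains s i then PySem.Set.discard s i else PySem.Set.add s i)
      PySem.Set.empty).length = (pvOddKeys p).length := by
  obtain ⟨hn, hm⟩ := toggle_invariant (l := p) PySem.Set.empty (by simp [PySem.Set.empty])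
  refine List.Perm.length_eq ?_
  unfold pvOddKeys
  rw [List.perm_ext_iff_of_nodup hn ((PySem.Set.nodup_ofList p).filter _)]
  intro x
  rw [hm x, List.mem_filter, PySem.Set.mem_ofList]
  constructor
  · rintro (⟨h, _⟩ | ⟨_, h⟩)
    · exact absurd h (by simp [PySem.Set.empty])
    · have hx : x ∈ p := by
        rw [← List.count_pos_iff]; omega
      exact ⟨hx, by simpa using h⟩
  · rintro ⟨_, h⟩
    right
    exact ⟨by simp [PySem.Set.empty], by simpa using h⟩

-- A's count of odd frequencies equals the number of distinct elements with odd count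
theorem values_countP_eq (p : List Int) :
    ((p.foldl (fun d i => d.insert i (d.getD i 0 + 1)) (PySem.Dict.empty : PySem.Dict Int Int)).values.countP
      (fun v => !(v % 2 == 0))) = (pvOddKeys p).length := by
  set d := p.foldl (fun d i => d.insert i (d.getD i 0 + 1)) (PySem.Dict.empty : PySem.Dict Int Int) with hd
  have hkeys : d.keys = PySem.Set.ofList p := by
    rw [hd, PySem.Dict.keys_foldl_insert]
    simp [PySem.Dict.keys_empty, PySem.Set.update_nil_left]
  have hnd : d.keys.Nodup := hkeys ▸ PySem.Set.nodup_ofList p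
  have hvals : d.values = d.keys.map (fun k => d.getD k 0) :=
    PySem.Dict.values_eq_map_keys d hnd 0
  have hget : ∀ k, d.getD k 0 = (p.count k : Int) := by
    intro k
    rw [hd, PySem.Dict.getD_foldl_insert_add_one]
    simp [PySem.Dict.getD_empty]
  rw [hvals, hkeys, List.countP_map, pvOddKeys, ← List.countP_eq_length_filter]
  apply List.countP_congr
  intro k _
  simp only [Function.comp, hget k]
  constructor
  · intro h
    have h2 : ¬ ((p.count k : Int) % 2 = 0) := by simpa using h
    have h3 : p.count k % 2 = 1 := by omega
    simpa using h3
  · intro h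
    have h1 : p.count k % 2 = 1 := by simpa using h
    have h2 : ¬ ((p.count k : Int) % 2 = 0) := by omega
    simpa using h2

-- ===== VERDICT (by name: the statement is the Claim_ definition above) =====
theorem isPseudoPalindromic_spec : Claim_equal_isPseudoPalindromic := by
  intro p _
  unfold Spec_isPseudoPalindromic isPseudoPalindromic isPseudoPalindromic_alt
  rw [pvOddLoop_eq _ 0 (by norm_num)]
  rw [values_countP_eq]
  simp only [PySem.Set.len, toggle_perm_oddKeys p]
  simp only [decide_eq_decide]
  omega
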